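-- pv_equiv track=rewrite | github.com/edt-yxz-zzd/python3_src | nn_ns/codec/bits2iter_dyncode.py | padded_bits2iter_bits
-- ===== SOURCE A (Python) =====
-- import itertools
-- from collections import deque
--
-- def slice_le(iterable, n):
--     return tuple(itertools.islice(iterable, n))
--     return first_le_n
--
-- def padded_bits2iter_bits(padded_bits):
--     L = 7
--     it = iter(padded_bits)
--     d = deque(slice_le(it, L), L)
--     if len(d) < L:
--         assert len(d) == 6
--     else:
--         for b in it:
--             yield d.popleft()
--             d.append(b)
--         assert len(d) == L
--
--     if any(d):
--         while not d.pop():pass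
--     else:
--         # no pad
--         pass
--
--     yield from d
--     return
-- ===== SOURCE B (Python) =====
-- def padded_bits2iter_bits(padded_bits):
--     bits = list(padded_bits)
--     if len(bits) < 7:
--         assert len(bits) == 6
--         head, tail = [], bits
--     else:
--         head, tail = bits[:-7], bits[-7:]
--     if any(tail):
--         i = len(tail) - 1
--         while not tail[i]:
--             i -= 1
--         tail = tail[:i]
--     yield from head
--     yield from tail
-- ===== Notes on version B (the rewrite author's own statement) =====
-- stated objective: simpler
-- what changed: replaces the 7-element sliding-deque streaming window (popleft/append per element, then destructive right-pops) with a materialize-then-split pass: slice the list into head and a 7-bit tail, find the last nonzero index, and truncate the tail before it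
import Mathlib
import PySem

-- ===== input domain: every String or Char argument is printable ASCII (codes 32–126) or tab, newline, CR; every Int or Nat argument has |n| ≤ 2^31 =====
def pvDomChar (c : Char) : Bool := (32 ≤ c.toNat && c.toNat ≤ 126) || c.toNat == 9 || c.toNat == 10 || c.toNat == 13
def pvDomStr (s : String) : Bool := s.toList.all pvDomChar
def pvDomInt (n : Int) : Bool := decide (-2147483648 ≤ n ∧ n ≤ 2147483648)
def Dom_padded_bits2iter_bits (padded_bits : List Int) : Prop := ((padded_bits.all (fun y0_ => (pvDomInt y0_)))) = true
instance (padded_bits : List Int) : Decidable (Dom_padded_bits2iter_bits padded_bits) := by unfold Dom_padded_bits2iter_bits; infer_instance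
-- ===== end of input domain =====

-- B strips the trailing pad (final 1-bit and the zeros after it) by slicing the
-- materialized list instead of streaming through a 7-element deque window.
-- Equivalence is about the yielded sequence (both Pythons are generators).

-- ===== PORT A =====
-- the for-loop over the remaining iterator: yield d.popleft(); d.append(b)
def pvALoop : List Int → List Int → (List Int × List Int)
  | d, [] => ([], d)
  | [], _ :: _ => ([], [])        -- unreachable: d always has 7 elements here
  | y :: ds, b :: rest =>
    let p := pvALoop (ds ++ [b]) rest
    (y :: p.1, p.2)

-- 'while not d.pop(): pass' acting on the reversed deque: drop the popped zeros
-- and the final truthy pop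
def pvDropPad : List Int → List Int
  | [] => []                      -- unreachable under the any() guard
  | x :: xs => if x == 0 then pvDropPad xs else xs

def padded_bits2iter_bits (padded_bits : List Int) : List Int :=
  let d0 := padded_bits.take 7
  let rest := padded_bits.drop 7
  let hd := if d0.length < 7 then (([] : List Int), d0) else pvALoop d0 rest
  let d' := if hd.2.any (fun b => b != 0) then (pvDropPad hd.2.reverse).reverse else hd.2
  hd.1 ++ d'

-- ===== PORT B =====
-- 'i = len(tail)-1; while not tail[i]: i -= 1' : index of the last nonzero bit
def pvFindIdx (tail : List Int) : Nat → Nat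
  | 0 => 0
  | i+1 => if tail.getD (i+1) 0 != 0 then i+1 else pvFindIdx tail i

def padded_bits2iter_bits_alt (padded_bits : List Int) : List Int :=
  let bits := padded_bits
  let ht := if bits.length < 7 then (([] : List Int), bits)
            else (bits.take (bits.length - 7), bits.drop (bits.length - 7))
  let tail' := if ht.2.any (fun b => b != 0)
               then ht.2.take (pvFindIdx ht.2 (ht.2.length - 1)) else ht.2
  ht.1 ++ tail'

-- ===== PRECONDITION & SPEC =====
-- Pre_ excludes inputs of length 0..5, on which A's assert fails (AssertionError);
-- B's assert fails there too.
def Pre_padded_bits2iter_bits (padded_bits : List Int) : Prop :=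
  padded_bits.length = 6 ∨ 7 ≤ padded_bits.length
instance (padded_bits : List Int) : Decidable (Pre_padded_bits2iter_bits padded_bits) := by
  unfold Pre_padded_bits2iter_bits; infer_instance
def pvWitness_padded_bits2iter_bits : List Int := [1, 0, 1, 1, 0, 0, 0, 1, 0, 0]

def Spec_padded_bits2iter_bits (padded_bits : List Int) (out : List Int) : Prop := out = padded_bits2iter_bits_alt padded_bits
instance (padded_bits : List Int) (out : List Int) : Decidable (Spec_padded_bits2iter_bits padded_bits out) := by unfold Spec_padded_bits2iter_bits; infer_instance

-- ===== CLAIM (what is proved, stated in full; the proofs are below) =====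
def Claim_equal_padded_bits2iter_bits : Prop := ∀ (padded_bits : List Int), Dom_padded_bits2iter_bits padded_bits → Pre_padded_bits2iter_bits padded_bits → Spec_padded_bits2iter_bits padded_bits (padded_bits2iter_bits padded_bits)

-- ===== LEMMAS AND PROOFS =====

theorem pvALoop_eq (rest : List Int) : ∀ d : List Int, d ≠ [] →
    pvALoop d rest = ((d ++ rest).take rest.length, (d ++ rest).drop rest.length) := by
  induction rest with
  | nil => intro d _; simp [pvALoop]
  | cons b r ih =>
    intro d hd
    match d, hd with
    | y :: ds, _ =>
      have h := ih (ds ++ [b]) (by simp)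
      simp [pvALoop, h, List.take_succ_cons, List.drop_succ_cons]

theorem pvFindIdx_le (t : List Int) : ∀ i, pvFindIdx t i ≤ i := by
  intro i
  induction i with
  | zero => simp [pvFindIdx]
  | succ k ih => simp only [pvFindIdx]; split
                 · omega
                 · omega

theorem pvFindIdx_append (xs : List Int) (x : Int) :
    ∀ i, i < xs.length → pvFindIdx (xs ++ [x]) i = pvFindIdx xs i := by
  intro i
  induction i with
  | zero => intro _; simp [pvFindIdx]
  | succ k ih =>
    intro h
    have hg : (xs ++ [x]).getD (k+1) 0 = xs.getD (k+1) 0 := by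
      simp [List.getD, List.getElem?_append_left h]
    simp only [pvFindIdx, hg]
    split
    · rfl
    · exact ih (by omega)

theorem strip_eq (tail : List Int) (h : tail.any (fun b => b != 0) = true) :
    (pvDropPad tail.reverse).reverse = tail.take (pvFindIdx tail (tail.length - 1)) := by
  induction tail using List.reverseRecOn with
  | nil => simp at h
  | append_singleton xs x ih =>
    rw [List.reverse_append, List.reverse_singleton]
    simp only [List.singleton_append, pvDropPad]
    by_cases hx : x = 0
    · subst hx
      simp only [beq_self_eq_true, if_true]
      have hxs : xs.any (fun b => b != 0) = true := by
        simp only [List.any_append, List.any_cons, List.any_nil] at h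
        simpa using h
      have hne : xs ≠ [] := by rintro rfl; simp at hxs
      have hlen : 1 ≤ xs.length := by
        cases xs with | nil => exact absurd rfl hne | cons a l => simp
      have hlen2 : (xs ++ [(0:Int)]).length - 1 = xs.length := by simp
      rw [hlen2]
      obtain ⟨k, hk⟩ : ∃ k, xs.length = k + 1 := ⟨xs.length - 1, by omega⟩
      have hg : (xs ++ [(0:Int)]).getD xs.length 0 = 0 := by
        simp [List.getD]
      rw [hk]
      simp only [pvFindIdx]
      rw [show (xs ++ [(0:Int)]).getD (k+1) 0 = 0 by rw [← hk]; exact hg]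
      simp only [bne_self_eq_false, Bool.false_eq_true, if_false]
      rw [pvFindIdx_append xs 0 k (by omega)]
      have hle : pvFindIdx xs k ≤ k := pvFindIdx_le xs k
      rw [List.take_append_of_le_length (by omega)]
      have := ih hxs
      rw [hk] at this
      simpa using this
    · have hx' : (x == (0:Int)) = false := by simp [hx]
      simp only [hx']
      have hlen2 : (xs ++ [x]).length - 1 = xs.length := by simp
      rw [hlen2]
      cases hxs : xs.length with
      | zero =>
        have : xs = [] := List.eq_nil_of_length_eq_zero hxs
        subst this
        simp [pvFindIdx]
      | succ k =>
        simp only [pvFindIdx, ← hxs]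
        have hg : (xs ++ [x]).getD xs.length 0 = x := by
          simp [List.getD]
        rw [hxs] at hg
        rw [hxs]
        simp only [hg]
        have : (x != (0:Int)) = true := by simp [hx]
        rw [this]
        simp only [if_true]
        rw [← hxs, List.take_append_of_le_length (le_refl xs.length)]
        simp

-- ===== VERDICT (by name: the statement is the Claim_ definition above) =====
theorem padded_bits2iter_bits_spec : Claim_equal_padded_bits2iter_bits := by
  intro bits _ hpre
  unfold Spec_padded_bits2iter_bits padded_bits2iter_bits padded_bits2iter_bits_alt
  dsimp only
  rcases hpre with h6 | h7
  · have hlt : bits.length < 7 := by omega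
    have htake : bits.take 7 = bits := List.take_of_length_le (by omega)
    rw [htake, if_pos hlt, if_pos hlt]
    dsimp only
    split_ifs with h
    · rw [strip_eq bits h]
    · rfl
  · have hnlt : ¬ bits.length < 7 := by omega
    have hlen : (bits.take 7).length = 7 := by simp; omega
    have hne : bits.take 7 ≠ [] := by
      intro hnil; rw [hnil] at hlen; simp at hlen
    have hta : bits.take 7 ++ bits.drop 7 = bits := List.take_append_drop 7 bits
    have hrl : (bits.drop 7).length = bits.length - 7 := by simp
    rw [hlen, if_neg (by omega : ¬ (7:Nat) < 7), if_neg hnlt,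
        pvALoop_eq (bits.drop 7) (bits.take 7) hne, hta, hrl]
    dsimp only
    split_ifs with h
    · rw [strip_eq _ h]
    · rfl
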